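-- pv_equiv track=rewrite | github.com/FServais/IEEEXtreme-2015 | DictionaryStrings/DictionaryStrings.py | difference_dict
-- ===== SOURCE A (Python) =====
-- def difference_dict(aggregation, decomp_dict):
--     difference = 0
--
--     for letter, count in aggregation.items():
--         if letter not in decomp_dict:
--             difference += count
--         elif decomp_dict[letter] < count:
--             difference += (count - decomp_dict[letter])
--
--     return difference
-- ===== SOURCE B (Python) =====
-- def difference_dict(aggregation, decomp_dict):
--     # Different strategy: instead of scanning aggregation and branching per key,
--     # copy aggregation into a remaining-needs table, consume it by iterating
--     # over decomp_dict (clamping each covered entry at zero), then sum what is left.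
--     remaining = dict(aggregation)
--     for letter, cnt in decomp_dict.items():
--         if letter in remaining:
--             r = remaining[letter] - cnt
--             remaining[letter] = r if r > 0 else 0
--     return sum(remaining.values())
-- ===== Notes on version B (the rewrite author's own statement) =====
-- stated objective: alternative
-- what changed: B reverses the traversal: instead of scanning aggregation and branching on each key's presence in decomp_dict, it copies aggregation into a remaining-needs dict, iterates over decomp_dict consuming (clamping at zero) each entry it covers, and returns the sum of the leftover values.
import Mathlib
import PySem

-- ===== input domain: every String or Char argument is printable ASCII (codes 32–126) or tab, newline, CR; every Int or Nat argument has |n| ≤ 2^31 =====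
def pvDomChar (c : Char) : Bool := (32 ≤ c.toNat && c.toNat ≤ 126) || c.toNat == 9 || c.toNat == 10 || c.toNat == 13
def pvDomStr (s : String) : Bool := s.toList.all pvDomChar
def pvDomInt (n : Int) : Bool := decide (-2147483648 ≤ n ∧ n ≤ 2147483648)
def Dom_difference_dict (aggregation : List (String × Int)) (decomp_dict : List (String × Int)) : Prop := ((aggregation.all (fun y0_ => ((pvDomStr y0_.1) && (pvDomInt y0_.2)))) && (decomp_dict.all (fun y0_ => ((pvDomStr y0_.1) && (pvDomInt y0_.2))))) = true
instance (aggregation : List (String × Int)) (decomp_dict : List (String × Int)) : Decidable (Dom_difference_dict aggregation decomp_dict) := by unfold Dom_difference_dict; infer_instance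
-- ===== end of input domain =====

-- B reverses the traversal: it copies aggregation into a remaining-needs dict, consumes it
-- by iterating over decomp_dict (clamping each covered entry at zero), and sums what is left.

-- ===== PORT A =====
def difference_dict (aggregation : List (String × Int)) (decomp_dict : List (String × Int)) : Int :=
  let agg := PySem.Dict.ofList aggregation
  let dd := PySem.Dict.ofList decomp_dict
  agg.items.foldl (fun difference p =>
    if ¬ dd.contains p.1 then difference + p.2
    else if dd.getD p.1 0 < p.2 then difference + (p.2 - dd.getD p.1 0)
    else difference) 0

-- ===== PORT B =====
def difference_dict_alt (aggregation : List (String × Int)) (decomp_dict : List (String × Int)) : Int :=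
  let dd := PySem.Dict.ofList decomp_dict
  let remaining := dd.items.foldl (fun rem p =>
    if rem.contains p.1 then
      let r := rem.getD p.1 0 - p.2
      rem.insert p.1 (if r > 0 then r else 0)
    else rem) (PySem.Dict.ofList aggregation)
  remaining.values.foldl (· + ·) 0

-- ===== PRECONDITION & SPEC =====
def Spec_difference_dict (aggregation : List (String × Int)) (decomp_dict : List (String × Int)) (out : Int) : Prop := out = difference_dict_alt aggregation decomp_dict
instance (aggregation : List (String × Int)) (decomp_dict : List (String × Int)) (out : Int) : Decidable (Spec_difference_dict aggregation decomp_dict out) := by unfold Spec_difference_dict; infer_instance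

-- ===== CLAIM (what is proved, stated in full; the proofs are below) =====
def Claim_equal_difference_dict : Prop := ∀ (aggregation : List (String × Int)) (decomp_dict : List (String × Int)), Dom_difference_dict aggregation decomp_dict → Spec_difference_dict aggregation decomp_dict (difference_dict aggregation decomp_dict)

-- ===== LEMMAS AND PROOFS =====

theorem lookup_eq_none_of_not_mem {ν : Type} (t : List (String × ν)) (k : String)
    (h : k ∉ t.map (·.1)) : t.lookup k = none := by
  induction t with
  | nil => rfl
  | cons p rest ih =>
    simp only [List.map_cons, List.mem_cons] at h
    push Not at h
    rw [List.lookup_cons]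
    have hne : (k == p.1) = false := by simpa using h.1
    simp [hne, ih h.2]

theorem get?_eq_lookup {ν : Type} (l : List (String × ν)) (k : String) :
    (PySem.Dict.mk l).get? k = l.lookup k := by
  induction l with
  | nil => rfl
  | cons p rest ih =>
    rw [PySem.Dict.get?_mk_cons, List.lookup_cons]
    by_cases h : k = p.1
    · simp [h]
    · have h1 : (p.1 == k) = false := by simpa using (Ne.symm h)
      have h2 : (k == p.1) = false := by simpa using h
      simp [h1, h2, ih]

theorem dict_get?_eq_lookup_items {ν : Type} (d : PySem.Dict String ν) (k : String) :
    d.get? k = d.items.lookup k :=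
  get?_eq_lookup d.items k

-- The clamping fold of B, characterised: over a list l with distinct keys it rewrites each
-- item of r whose key l carries, clamping its count, and touches nothing else.
theorem foldB_items (l : List (String × Int)) (r : PySem.Dict String Int)
    (hl : (l.map (·.1)).Nodup) (hr : r.keys.Nodup) :
    (l.foldl (fun rem p =>
      if rem.contains p.1 then
        let t := rem.getD p.1 0 - p.2
        rem.insert p.1 (if t > 0 then t else 0)
      else rem) r).items
    = r.items.map (fun p => match l.lookup p.1 with
        | some v => (p.1, if p.2 - v > 0 then p.2 - v else 0)
        | none => p) := by
  induction l generalizing r with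
  | nil =>
    simp only [List.foldl_nil, List.lookup_nil]
    exact (List.map_congr_left (fun p _ => rfl)).symm.trans (List.map_id _) |>.symm
  | cons q t ih =>
    simp only [List.map_cons, List.nodup_cons] at hl
    obtain ⟨hq, ht⟩ := hl
    rw [List.foldl_cons]
    by_cases hc : r.contains q.1 = true
    · rw [if_pos hc]
      have hr' : (r.insert q.1 (if r.getD q.1 0 - q.2 > 0 then r.getD q.1 0 - q.2 else 0)).keys.Nodup :=
        PySem.Dict.nodup_keys_insert _ _ _ hr
      rw [ih _ ht hr', PySem.Dict.items_insert, if_pos hc, List.map_map]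
      apply List.map_congr_left
      intro p hp
      by_cases hpk : p.1 = q.1
      · have hget : r.getD q.1 0 = p.2 := by
          have hm : (q.1, p.2) ∈ r.items := by rw [← hpk]; exact hp
          exact PySem.Dict.getD_of_mem_items _ hm hr 0
        have hnone : t.lookup q.1 = none := lookup_eq_none_of_not_mem t q.1 hq
        have hcons : List.lookup p.1 (q :: t) = some q.2 := by
          rw [List.lookup_cons]; simp [hpk]
        rw [hpk] at hcons
        simp [hcons, hnone, hget, hpk]
      · have hbeq : (p.1 == q.1) = false := by simpa using hpk
        have hcons : List.lookup p.1 (q :: t) = t.lookup p.1 := by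
          rw [List.lookup_cons]; simp [hbeq]
        simp [hpk, hcons]
    · rw [if_neg hc]
      rw [ih _ ht hr]
      apply List.map_congr_left
      intro p hp
      have hpk : p.1 ≠ q.1 := by
        intro he
        apply hc
        rw [PySem.Dict.contains_iff_mem_keys, ← he]
        exact PySem.Dict.mem_keys_of_mem_items _ hp
      have hbeq : (p.1 == q.1) = false := by simpa using hpk
      rw [List.lookup_cons]
      simp [hbeq]

theorem clamp_eq (c v : Int) :
    (if v < c then c - v else 0) = (if c - v > 0 then c - v else 0) := by
  by_cases h : v < c
  · rw [if_pos h, if_pos (by omega)]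
  · rw [if_neg h, if_neg (by omega)]

-- ===== VERDICT (by name: the statement is the Claim_ definition above) =====
theorem difference_dict_spec : Claim_equal_difference_dict := by
  intro aggregation decomp_dict _
  unfold Spec_difference_dict difference_dict difference_dict_alt
  simp only []
  set agg := PySem.Dict.ofList aggregation with hagg
  set dd := PySem.Dict.ofList decomp_dict with hdd
  -- A as a sum over agg.items
  have hA : agg.items.foldl (fun difference p =>
      if ¬ dd.contains p.1 then difference + p.2
      else if dd.getD p.1 0 < p.2 then difference + (p.2 - dd.getD p.1 0)
      else difference) 0
      = 0 + (agg.items.map (fun p =>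
          if ¬ dd.contains p.1 then p.2
          else if dd.getD p.1 0 < p.2 then p.2 - dd.getD p.1 0
          else 0)).sum := by
    rw [PySem.List.foldl_congr_mem
      (g := fun acc p => acc + (if ¬ dd.contains p.1 then p.2
          else if dd.getD p.1 0 < p.2 then p.2 - dd.getD p.1 0 else 0))]
    · exact PySem.List.foldl_add _ _ _
    · intro acc p _
      by_cases h1 : dd.contains p.1
      · by_cases h2 : dd.getD p.1 0 < p.2 <;> simp [h1, h2]
      · simp [h1]
  rw [hA]
  -- B's remaining dict, characterised
  have hlnd : (dd.items.map (·.1)).Nodup := PySem.Dict.nodup_keys_ofList decomp_dict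
  have hand : agg.keys.Nodup := PySem.Dict.nodup_keys_ofList aggregation
  have hrem := foldB_items dd.items agg hlnd hand
  have hB : (dd.items.foldl (fun rem p =>
      if rem.contains p.1 then
        let t := rem.getD p.1 0 - p.2
        rem.insert p.1 (if t > 0 then t else 0)
      else rem) agg).values.foldl (· + ·) 0
      = 0 + ((agg.items.map (fun p => match dd.items.lookup p.1 with
          | some v => (p.1, if p.2 - v > 0 then p.2 - v else 0)
          | none => p)).map (·.2)).sum := by
    rw [PySem.List.foldl_add (g := fun x => x)]
    simp only [PySem.Dict.values, hrem, List.map_id']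
  rw [hB, List.map_map]
  congr 1
  congr 1
  apply List.map_congr_left
  intro p _
  by_cases h1 : dd.contains p.1
  · have hsome : (dd.get? p.1).isSome := by
      rw [← PySem.Dict.contains_eq_isSome_get?]; exact h1
    obtain ⟨v, hv⟩ := Option.isSome_iff_exists.mp hsome
    have hlk : dd.items.lookup p.1 = some v := by
      rw [← dict_get?_eq_lookup_items]; exact hv
    have hgd : dd.getD p.1 0 = v := PySem.Dict.getD_of_get?_eq_some _ 0 hv
    simp only [Function.comp_apply, h1, not_true, if_false, hlk, hgd]
    exact clamp_eq p.2 v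
  · have hnone : dd.get? p.1 = none := by
      cases h : dd.get? p.1 with
      | none => rfl
      | some w =>
        exfalso
        apply h1
        rw [PySem.Dict.contains_eq_isSome_get?, h]
        rfl
    have hlk : dd.items.lookup p.1 = none := by
      rw [← dict_get?_eq_lookup_items]; exact hnone
    simp [Function.comp_apply, h1, hlk]
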